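-- pv_equiv track=rewrite | github.com/mageshyt/leetcode-solutions | sliding window/3208. Alternating Groups II.py | alternatingGroups
-- ===== SOURCE A (Python) =====
-- from typing import List
--
-- def alternatingGroups(colors: List[int], k: int) -> int:
--     n=len(colors)
--     count=0
--     left=0
--
--     for right in range(n):
--         if right > 0 and colors[right%n]==colors[right-1]:
--             left=right
--         # if we have k alternating colors
--         if right-left+1==k:
--             count+=1
--             left+=1
--
--     return count
-- ===== SOURCE B (Python) =====
-- def alternatingGroups(colors, k):
--     if k <= 0:
--         return 0
--     # collect lengths of maximal runs of adjacent alternating colors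
--     runs = []
--     run = 0
--     prev = None
--     for c in colors:
--         if prev is not None and c != prev:
--             run += 1
--         else:
--             if run:
--                 runs.append(run)
--             run = 1
--         prev = c
--     if run:
--         runs.append(run)
--     # each run of length L contains max(0, L-k+1) windows of size k
--     count = 0
--     for L in runs:
--         count += max(0, L - k + 1)
--     return count
-- ===== Notes on version B (the rewrite author's own statement) =====
-- stated objective: faster
-- what changed: Replaces A's grow/shrink sliding window over indices with a single element pass that collects maximal alternating run lengths, then sums the closed-form per-run window count max(0, L-k+1) (with an explicit 0 for non-positive k).
import Mathlib
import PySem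

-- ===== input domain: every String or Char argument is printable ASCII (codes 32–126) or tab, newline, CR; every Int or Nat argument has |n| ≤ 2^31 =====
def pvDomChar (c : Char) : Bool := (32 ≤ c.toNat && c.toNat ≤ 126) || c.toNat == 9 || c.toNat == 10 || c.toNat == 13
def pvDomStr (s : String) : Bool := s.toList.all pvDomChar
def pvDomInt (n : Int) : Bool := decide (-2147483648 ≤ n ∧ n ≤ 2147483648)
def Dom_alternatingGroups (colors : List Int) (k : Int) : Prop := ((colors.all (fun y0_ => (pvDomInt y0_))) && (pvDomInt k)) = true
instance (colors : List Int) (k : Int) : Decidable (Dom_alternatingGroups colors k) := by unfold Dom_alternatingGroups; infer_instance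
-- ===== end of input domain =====

-- B replaces A's grow/shrink sliding window with run-length collection plus a closed-form per-run count (alternative decomposition, same O(n) cost).

-- ===== PORT A =====
-- the pyGet? comparisons are exact: every index the loop compares is in range, so Python's IndexError path is unreachable
def alternatingGroups (colors : List Int) (k : Int) : Int :=
  let n : Int := PySem.List.len colors
  ((PySem.List.pyRange 0 n 1).foldl
    (fun (st : Int × Int) right =>
      let left : Int :=
        if 0 < right ∧ PySem.List.pyGet? colors (PySem.Int.mod right n) = PySem.List.pyGet? colors (right - 1)
        then right else st.2
      if right - left + 1 = k then (st.1 + 1, left + 1) else (st.1, left))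
    (0, 0)).1

-- ===== PORT B =====
def alternatingGroups_alt (colors : List Int) (k : Int) : Int :=
  if k ≤ 0 then 0
  else
    let st := colors.foldl
      (fun (st : List Int × Int × Option Int) c =>
        match st.2.2 with
        | some p =>
            if c ≠ p then (st.1, st.2.1 + 1, some c)
            else ((if st.2.1 ≠ 0 then st.1 ++ [st.2.1] else st.1), 1, some c)
        | none => ((if st.2.1 ≠ 0 then st.1 ++ [st.2.1] else st.1), 1, some c))
      ([], 0, none)
    let runs := if st.2.1 ≠ 0 then st.1 ++ [st.2.1] else st.1
    runs.foldl (fun count L => count + max 0 (L - k + 1)) 0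

-- ===== PRECONDITION & SPEC =====
def Spec_alternatingGroups (colors : List Int) (k : Int) (out : Int) : Prop := out = alternatingGroups_alt colors k
instance (colors : List Int) (k : Int) (out : Int) : Decidable (Spec_alternatingGroups colors k out) := by unfold Spec_alternatingGroups; infer_instance

-- ===== CLAIM (what is proved, stated in full; the proofs are below) =====
def Claim_equal_alternatingGroups : Prop := ∀ (colors : List Int) (k : Int), Dom_alternatingGroups colors k → Spec_alternatingGroups colors k (alternatingGroups colors k)

-- ===== LEMMAS AND PROOFS =====

-- number of size-k alternating windows contributed by a maximal run of length L
def payH (k L : Int) : Int := max 0 (L - k + 1)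

-- what B's run collection contributes from here on: prev = last colour seen, run = current run length
def bFinishH (k : Int) : Int → Int → List Int → Int
  | _, run, [] => payH k run
  | prev, run, c :: cs =>
      if c ≠ prev then bFinishH k c (run + 1) cs
      else payH k run + bFinishH k c 1 cs

-- A's loop with the index eliminated: state (count, w) where w = right - left entering the iteration
def loopAH (k : Int) : Int → List Int → Int × Int → Int × Int
  | _, [], s => s
  | prev, c :: cs, s =>
      let w1 : Int := if c = prev then 0 else s.2
      loopAH k c cs (if w1 + 1 = k then (s.1 + 1, w1) else (s.1, w1 + 1))

-- A's index fold equals loopAH over the remaining elements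
lemma A_loop_eq (colors : List Int) (k : Int) :
    ∀ (cs : List Int) (i : Nat) (prev count left : Int),
      1 ≤ i → colors.drop i = cs → colors[i - 1]? = some prev →
      ((PySem.List.pyRange (i : Int) (PySem.List.len colors) 1).foldl
        (fun (st : Int × Int) right =>
          let l : Int :=
            if 0 < right ∧ PySem.List.pyGet? colors (PySem.Int.mod right (PySem.List.len colors)) = PySem.List.pyGet? colors (right - 1)
            then right else st.2
          if right - l + 1 = k then (st.1 + 1, l + 1) else (st.1, l))
        (count, left)).1
      = (loopAH k prev cs (count, (i : Int) - left)).1 := by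
  intro cs
  induction cs with
  | nil =>
    intro i prev count left h1 hdrop hget
    have hlen : colors.length ≤ i := List.drop_eq_nil_iff.mp hdrop
    rw [PySem.List.pyRange_one_eq_nil (by simp; omega)]
    simp [loopAH]
  | cons c cs ih =>
    intro i prev count left h1 hdrop hget
    have hi : i < colors.length := by
      have := congrArg List.length hdrop
      simp [List.length_drop] at this
      omega
    have hci : colors[i]? = some c := by
      have h0 : (colors.drop i)[0]? = some c := by rw [hdrop]; rfl
      rw [List.getElem?_drop] at h0
      simpa using h0
    have hdrop' : colors.drop (i + 1) = cs := by
      have := congrArg List.tail hdrop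
      simpa [List.tail_drop] using this
    have hmod : PySem.Int.mod (i : Int) (PySem.List.len colors) = (i : Int) := by
      rw [PySem.Int.mod_eq_emod_of_pos (by simp; omega)]
      rw [Int.emod_eq_of_lt (by omega) (by simp; omega)]
    have hgi : PySem.List.pyGet? colors ((i : Int)) = some c := by
      simp [hci]
    have hgp : PySem.List.pyGet? colors ((i : Int) - 1) = some prev := by
      rw [show ((i : Int) - 1) = ((i - 1 : Nat) : Int) by omega]
      simp [hget]
    rw [PySem.List.pyRange_one_cons (by simp; omega), List.foldl_cons]
    have ih' := ih (i + 1) c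
    push_cast at ih'
    simp only [loopAH, hmod, hgi, hgp, Option.some.injEq]
    by_cases hc : c = prev
    · simp only [if_pos (show 0 < (i : Int) ∧ c = prev from ⟨by omega, hc⟩), if_pos hc]
      rw [show (i : Int) - (i : Int) + 1 = 0 + 1 by ring]
      by_cases hk1 : (0 : Int) + 1 = k
      · rw [if_pos hk1, if_pos hk1]
        have h2 := ih' (count + 1) ((i : Int) + 1) trivial hdrop' hci
        rw [show (i : Int) + 1 - ((i : Int) + 1) = 0 by ring] at h2
        exact h2
      · rw [if_neg hk1, if_neg hk1]
        have h2 := ih' count ((i : Int)) trivial hdrop' hci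
        rw [show (i : Int) + 1 - (i : Int) = 0 + 1 by ring] at h2
        exact h2
    · simp only [if_neg (show ¬(0 < (i : Int) ∧ c = prev) from fun h => hc h.2), if_neg hc]
      by_cases hw : (i : Int) - left + 1 = k
      · rw [if_pos hw, if_pos hw]
        have h2 := ih' (count + 1) (left + 1) trivial hdrop' hci
        rw [show (i : Int) + 1 - (left + 1) = (i : Int) - left by ring] at h2
        exact h2
      · rw [if_neg hw, if_neg hw]
        have h2 := ih' count left trivial hdrop' hci
        rw [show (i : Int) + 1 - left = (i : Int) - left + 1 by ring] at h2
        exact h2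

-- for k ≥ 1, loopAH's count is the run-based sum
lemma loopA_count (k : Int) (hk : 1 ≤ k) :
    ∀ (cs : List Int) (prev run count : Int), 1 ≤ run →
      (loopAH k prev cs (count, min run (k - 1))).1 = count - payH k run + bFinishH k prev run cs := by
  intro cs
  induction cs with
  | nil => intro prev run count hrun; simp [loopAH, bFinishH]
  | cons c cs ih =>
    intro prev run count hrun
    by_cases hc : c = prev
    · subst hc
      simp only [loopAH, bFinishH, ne_eq, not_true_eq_false, if_false, if_true]
      by_cases hk1 : (0 : Int) + 1 = k
      · rw [if_pos hk1]
        have h := ih c 1 (count + 1) le_rfl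
        rw [show min (1 : Int) (k - 1) = 0 by omega] at h
        rw [h]
        simp only [payH]
        omega
      · rw [if_neg hk1]
        have h := ih c 1 count le_rfl
        rw [show min (1 : Int) (k - 1) = 0 + 1 by omega] at h
        rw [h]
        simp only [payH]
        omega
    · simp only [loopAH, bFinishH, ne_eq, hc, not_false_eq_true, if_true, if_false]
      by_cases hw : min run (k - 1) + 1 = k
      · rw [if_pos hw]
        have h := ih c (run + 1) (count + 1) (by omega)
        rw [show min (run + 1) (k - 1) = min run (k - 1) by omega] at h
        rw [h]
        simp only [payH]
        omega
      · rw [if_neg hw]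
        have h := ih c (run + 1) count (by omega)
        rw [show min (run + 1) (k - 1) = min run (k - 1) + 1 by omega] at h
        rw [h]
        simp only [payH]
        omega

-- for k ≤ 0 the window test never fires
lemma loopA_nonpos (k : Int) (hk : k ≤ 0) :
    ∀ (cs : List Int) (prev count w : Int), 0 ≤ w →
      (loopAH k prev cs (count, w)).1 = count := by
  intro cs
  induction cs with
  | nil => intro prev count w hw; simp [loopAH]
  | cons c cs ih =>
    intro prev count w hw
    by_cases hc : c = prev
    · subst hc
      simp only [loopAH]
      rw [if_neg (by omega)]
      exact ih c count 1 (by omega)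
    · simp only [loopAH, if_neg hc]
      rw [if_neg (by omega)]
      exact ih c count (w + 1) (by omega)

def sumPayH (k : Int) (l : List Int) : Int := (l.map (payH k)).sum

lemma foldl_pay (k : Int) : ∀ (l : List Int) (a : Int),
    l.foldl (fun count L => count + max 0 (L - k + 1)) a = a + sumPayH k l := by
  intro l
  induction l with
  | nil => intro a; simp [sumPayH]
  | cons x l ih =>
    intro a
    simp only [List.foldl_cons, ih, sumPayH, List.map_cons, List.sum_cons, payH]
    ring

-- B's run-collecting fold, summed, equals bFinishH
lemma B_fold_eq (k : Int) :
    ∀ (cs : List Int) (prev run : Int) (runs : List Int), 1 ≤ run →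
      sumPayH k
        (if (cs.foldl
              (fun (st : List Int × Int × Option Int) c =>
                match st.2.2 with
                | some p =>
                    if c ≠ p then (st.1, st.2.1 + 1, some c)
                    else ((if st.2.1 ≠ 0 then st.1 ++ [st.2.1] else st.1), 1, some c)
                | none => ((if st.2.1 ≠ 0 then st.1 ++ [st.2.1] else st.1), 1, some c))
              (runs, run, some prev)).2.1 ≠ 0
         then (cs.foldl
              (fun (st : List Int × Int × Option Int) c =>
                match st.2.2 with
                | some p =>
                    if c ≠ p then (st.1, st.2.1 + 1, some c)
                    else ((if st.2.1 ≠ 0 then st.1 ++ [st.2.1] else st.1), 1, some c)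
                | none => ((if st.2.1 ≠ 0 then st.1 ++ [st.2.1] else st.1), 1, some c))
              (runs, run, some prev)).1 ++ [(cs.foldl
              (fun (st : List Int × Int × Option Int) c =>
                match st.2.2 with
                | some p =>
                    if c ≠ p then (st.1, st.2.1 + 1, some c)
                    else ((if st.2.1 ≠ 0 then st.1 ++ [st.2.1] else st.1), 1, some c)
                | none => ((if st.2.1 ≠ 0 then st.1 ++ [st.2.1] else st.1), 1, some c))
              (runs, run, some prev)).2.1]
         else (cs.foldl
              (fun (st : List Int × Int × Option Int) c =>
                match st.2.2 with
                | some p =>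
                    if c ≠ p then (st.1, st.2.1 + 1, some c)
                    else ((if st.2.1 ≠ 0 then st.1 ++ [st.2.1] else st.1), 1, some c)
                | none => ((if st.2.1 ≠ 0 then st.1 ++ [st.2.1] else st.1), 1, some c))
              (runs, run, some prev)).1)
      = sumPayH k runs + bFinishH k prev run cs := by
  intro cs
  induction cs with
  | nil =>
    intro prev run runs hrun
    simp only [List.foldl_nil, bFinishH]
    rw [if_pos (show run ≠ 0 by omega)]
    simp [sumPayH]
  | cons c cs ih =>
    intro prev run runs hrun
    by_cases hc : c = prev
    · subst hc
      simp only [List.foldl_cons, ne_eq, not_true_eq_false, if_false]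
      rw [if_pos (show run ≠ 0 by omega)]
      have h := ih c 1 (runs ++ [run]) le_rfl
      simp only [] at h
      rw [h]
      simp only [bFinishH, ne_eq, not_true_eq_false, if_false, sumPayH, List.map_append,
        List.sum_append, List.map_cons, List.sum_cons, List.map_nil, List.sum_nil]
      ring
    · simp only [List.foldl_cons, ne_eq, hc, not_false_eq_true, if_true]
      have h := ih c (run + 1) runs (by omega)
      rw [h]
      simp only [bFinishH, ne_eq, hc, not_false_eq_true, if_true]

-- B on a nonempty list with k ≥ 1 computes bFinishH
lemma B_cons_eq (c0 : Int) (cs : List Int) (k : Int) (hk : 1 ≤ k) :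
    alternatingGroups_alt (c0 :: cs) k = bFinishH k c0 1 cs := by
  simp only [alternatingGroups_alt, if_neg (show ¬ k ≤ 0 by omega)]
  have hstep : List.foldl (fun (st : List Int × Int × Option Int) c =>
      match st.2.2 with
      | some p =>
          if c ≠ p then (st.1, st.2.1 + 1, some c)
          else ((if st.2.1 ≠ 0 then st.1 ++ [st.2.1] else st.1), 1, some c)
      | none => ((if st.2.1 ≠ 0 then st.1 ++ [st.2.1] else st.1), 1, some c))
      ([], 0, none) (c0 :: cs)
      = List.foldl (fun (st : List Int × Int × Option Int) c =>
      match st.2.2 with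
      | some p =>
          if c ≠ p then (st.1, st.2.1 + 1, some c)
          else ((if st.2.1 ≠ 0 then st.1 ++ [st.2.1] else st.1), 1, some c)
      | none => ((if st.2.1 ≠ 0 then st.1 ++ [st.2.1] else st.1), 1, some c))
      ([], 1, some c0) cs := rfl
  rw [hstep, foldl_pay]
  have hb := B_fold_eq k cs c0 1 [] le_rfl
  rw [hb]
  simp [sumPayH]

lemma main_eq (colors : List Int) (k : Int) :
    alternatingGroups colors k = alternatingGroups_alt colors k := by
  cases colors with
  | nil =>
    simp [alternatingGroups, alternatingGroups_alt, PySem.List.pyRange_one_eq_nil le_rfl]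
  | cons c0 cs =>
    simp only [alternatingGroups]
    rw [PySem.List.pyRange_one_cons (by simp), List.foldl_cons]
    simp only [lt_irrefl, false_and, if_false]
    by_cases hk1 : (0 : Int) - 0 + 1 = k
    · rw [if_pos hk1, B_cons_eq c0 cs k (by omega)]
      have key := A_loop_eq (c0 :: cs) k cs 1 c0 1 1 le_rfl rfl rfl
      push_cast at key
      refine Eq.trans key ?_
      have hcnt := loopA_count k (by omega) cs c0 1 1 le_rfl
      rw [show min (1 : Int) (k - 1) = 1 - 1 by omega] at hcnt
      refine Eq.trans hcnt ?_
      simp only [payH]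
      omega
    · by_cases hk0 : k ≤ 0
      · rw [if_neg hk1]
        simp only [alternatingGroups_alt, if_pos hk0]
        have key := A_loop_eq (c0 :: cs) k cs 1 c0 0 0 le_rfl rfl rfl
        push_cast at key
        exact key.trans (loopA_nonpos k hk0 cs c0 0 1 (by omega))
      · rw [if_neg hk1, B_cons_eq c0 cs k (by omega)]
        have key := A_loop_eq (c0 :: cs) k cs 1 c0 0 0 le_rfl rfl rfl
        push_cast at key
        refine Eq.trans key ?_
        have hcnt := loopA_count k (by omega) cs c0 1 0 le_rfl
        rw [show min (1 : Int) (k - 1) = 1 - 0 by omega] at hcnt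
        refine Eq.trans hcnt ?_
        simp only [payH]
        omega


-- ===== VERDICT (by name: the statement is the Claim_ definition above) =====
theorem alternatingGroups_spec : Claim_equal_alternatingGroups := by
  intro colors k _
  unfold Spec_alternatingGroups
  exact main_eq colors k
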